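-- pv_equiv track=rewrite | github.com/Tortus-exe/courseCombinationCalculator | course.py | getAvgLengthBreaks
-- ===== SOURCE A (Python) =====
-- import itertools
--
-- PENALIZEDBREAKLENGTHS = [2,3,4,5]
--
-- def getAvgLengthBreaks(timeTable):
-- 	rle = list(map(lambda x: [(k, sum(1 for i in g)) for k,g in itertools.groupby(x)], timeTable))
-- 	for day in rle:
-- 		if(day[-1][0] == 0):
-- 			day.pop()
-- 		if(len(day) == 0):
-- 			continue
-- 		if(day[0][0] == 0):
-- 			day.pop(0)
-- 	return (sum([sum([run[1] for run in day if run[0] == 0]) for day in rle]), sum([sum([1 for run in day if (run[0] == 0 and run[1] in PENALIZEDBREAKLENGTHS)]) for day in rle]))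
-- ===== SOURCE B (Python) =====
-- def getAvgLengthBreaks(timeTable):
--     total = 0
--     pen = 0
--     for day in timeTable:
--         seen = False
--         zeros = 0
--         for v in day:
--             if v == 0:
--                 zeros += 1
--             else:
--                 if seen and zeros:
--                     total += zeros
--                     if 2 <= zeros <= 5:
--                         pen += 1
--                 seen = True
--                 zeros = 0
--     return (total, pen)
-- ===== Notes on version B (the rewrite author's own statement) =====
-- stated objective: simpler
-- what changed: Replaces the groupby run-length-encoding plus mutate-and-trim passes by a single left-to-right scan per day that keeps only a seen-nonzero flag and a pending zero-run counter, adding a run when a nonzero closes it (so leading/trailing zeros never count).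
import Mathlib
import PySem

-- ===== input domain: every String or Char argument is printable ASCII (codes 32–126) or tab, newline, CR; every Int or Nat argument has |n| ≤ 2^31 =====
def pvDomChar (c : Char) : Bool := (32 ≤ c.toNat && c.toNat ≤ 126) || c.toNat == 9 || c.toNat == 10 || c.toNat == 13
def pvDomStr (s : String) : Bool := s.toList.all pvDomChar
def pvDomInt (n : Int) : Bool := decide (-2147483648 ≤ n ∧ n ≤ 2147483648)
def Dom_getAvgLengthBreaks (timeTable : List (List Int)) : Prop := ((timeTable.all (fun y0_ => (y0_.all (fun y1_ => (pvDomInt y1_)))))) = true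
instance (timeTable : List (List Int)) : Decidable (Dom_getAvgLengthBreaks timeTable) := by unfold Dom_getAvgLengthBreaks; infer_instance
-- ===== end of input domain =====

-- B replaces A's groupby/RLE + trim passes by one scan per day keeping a seen-flag and a pending zero-run counter; objective: simpler.


-- ===== PORT A =====
-- itertools.groupby + sum(1 for i in g): run-length encoding with Int counts
def rleAux (v : Int) (c : Int) : List Int → List (Int × Int)
  | [] => [(v, c)]
  | x :: xs => if x = v then rleAux v (c + 1) xs else (v, c) :: rleAux x 1 xs

def rleOf : List Int → List (Int × Int)
  | [] => []
  | x :: xs => rleAux x 1 xs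

-- the body of A's mutating for-loop over one day's run list (day[-1] via pyGet?;
-- none = Python's IndexError on an empty day, excluded by Pre_, the port leaves
-- the day unchanged there)
def trimDay (day : List (Int × Int)) : List (Int × Int) :=
  let day1 := match PySem.List.pyGet? day (-1) with
    | some r => if r.1 = 0 then day.dropLast else day
    | none => day
  if day1.length = 0 then day1
  else match day1 with
    | r :: rest => if r.1 = 0 then rest else day1
    | [] => day1

def getAvgLengthBreaks (timeTable : List (List Int)) : Int × Int :=
  let rle := timeTable.map (fun x => rleOf x)
  let rle2 := rle.map trimDay
  ((rle2.map (fun day => (((day.filter (fun run => run.1 = 0)).map (fun run => run.2)).sum))).sum,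
   (rle2.map (fun day => (((day.filter (fun run => run.1 = 0 ∧ run.2 ∈ ([2, 3, 4, 5] : List Int))).map (fun _ => (1 : Int))).sum))).sum)

-- ===== PORT B =====
-- one pass per day: state = (seen a nonzero yet, pending zeros, total, penalized count)
def altStep (st : Bool × Int × Int × Int) (v : Int) : Bool × Int × Int × Int :=
  let (seen, zeros, total, pen) := st
  if v = 0 then (seen, zeros + 1, total, pen)
  else if seen ∧ zeros ≠ 0 then
    (true, 0, total + zeros, pen + (if 2 ≤ zeros ∧ zeros ≤ 5 then 1 else 0))
  else (true, 0, total, pen)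

def getAvgLengthBreaks_alt (timeTable : List (List Int)) : Int × Int :=
  timeTable.foldl (fun (acc : Int × Int) day =>
    let s := day.foldl altStep (false, 0, acc.1, acc.2)
    (s.2.2.1, s.2.2.2)) (0, 0)

-- ===== PRECONDITION & SPEC =====
-- Python A evaluates day[-1] on every day, so it raises IndexError exactly when some day is empty; Pre_ excludes those inputs.
def Pre_getAvgLengthBreaks (timeTable : List (List Int)) : Prop := ∀ day ∈ timeTable, day ≠ []
instance (timeTable : List (List Int)) : Decidable (Pre_getAvgLengthBreaks timeTable) := by unfold Pre_getAvgLengthBreaks; infer_instance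
def pvWitness_getAvgLengthBreaks : List (List Int) := [[1, 0, 0, 2], [0, 3, 0]]


def Spec_getAvgLengthBreaks (timeTable : List (List Int)) (out : Int × Int) : Prop := out = getAvgLengthBreaks_alt timeTable
instance (timeTable : List (List Int)) (out : Int × Int) : Decidable (Spec_getAvgLengthBreaks timeTable out) := by unfold Spec_getAvgLengthBreaks; infer_instance

-- ===== CLAIM (what is proved, stated in full; the proofs are below) =====
def Claim_equal_getAvgLengthBreaks : Prop := ∀ (timeTable : List (List Int)), Dom_getAvgLengthBreaks timeTable → Pre_getAvgLengthBreaks timeTable → Spec_getAvgLengthBreaks timeTable (getAvgLengthBreaks timeTable)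

-- ===== LEMMAS AND PROOFS =====

-- the two per-run-list sums A computes (definitionally the ones in the port)
def sumZ (day : List (Int × Int)) : Int :=
  ((day.filter (fun run => run.1 = 0)).map (fun run => run.2)).sum
def cntZ (day : List (Int × Int)) : Int :=
  ((day.filter (fun run => run.1 = 0 ∧ run.2 ∈ ([2, 3, 4, 5] : List Int))).map (fun _ => (1 : Int))).sum
-- the back-trim step of trimDay alone
def trimBack (day : List (Int × Int)) : List (Int × Int) :=
  match PySem.List.pyGet? day (-1) with
  | some r => if r.1 = 0 then day.dropLast else day
  | none => day

theorem pyGet_neg_one_cons {α : Type} (r : α) (l : List α) :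
    PySem.List.pyGet? (r :: l) (-1) = some ((r :: l).getLast (by simp)) := by
  simp [PySem.List.pyGet?, PySem.List.pyIdx?]
  rw [List.getLast_eq_getElem]
  congr 1
theorem trimBack_cons (r : Int × Int) (l : List (Int × Int)) (hl : l ≠ []) :
    trimBack (r :: l) = r :: trimBack l := by
  unfold trimBack
  cases l with
  | nil => exact absurd rfl hl
  | cons b bs =>
    rw [pyGet_neg_one_cons r (b :: bs), pyGet_neg_one_cons b bs]
    simp only [List.getLast_cons (by simp : (b :: bs) ≠ [])]
    split
    · rw [List.dropLast_cons_of_ne_nil (by simp)]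
    · rfl
theorem rleAux_ne_nil (v c : Int) (xs : List Int) : rleAux v c xs ≠ [] := by
  induction xs generalizing v c with
  | nil => simp [rleAux]
  | cons x xs ih => simp only [rleAux]; split <;> simp [ih]
theorem rleAux_head (v c : Int) (xs : List Int) :
    ∃ c' rest, rleAux v c xs = (v, c') :: rest := by
  induction xs generalizing c with
  | nil => exact ⟨c, [], rfl⟩
  | cons x xs ih =>
    simp only [rleAux]
    split
    · next h => subst h; exact ih (c + 1)
    · exact ⟨c, rleAux x 1 xs, rfl⟩

theorem trimBack_ne_nil_of_head_ne_zero (v c : Int) (hv : v ≠ 0) (l : List (Int × Int)) :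
    trimBack ((v, c) :: l) ≠ [] := by
  cases l with
  | nil =>
    unfold trimBack
    rw [pyGet_neg_one_cons]
    simp [hv]
  | cons b bs =>
    rw [trimBack_cons _ _ (by simp)]
    simp


theorem sumZ_cons (r : Int × Int) (l : List (Int × Int)) :
    sumZ (r :: l) = (if r.1 = 0 then r.2 else 0) + sumZ l := by
  simp only [sumZ, List.filter_cons]
  split_ifs with h <;> simp_all

theorem cntZ_cons (r : Int × Int) (l : List (Int × Int)) :
    cntZ (r :: l) = (if r.1 = 0 ∧ 2 ≤ r.2 ∧ r.2 ≤ 5 then 1 else 0) + cntZ l := by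
  simp only [cntZ, List.filter_cons]
  split_ifs with h h2 <;> simp_all <;> omega

theorem main_inv (xs : List Int) (k c t p z : Int) (hc : 1 ≤ c)
    (hz : z = if k = 0 then c else 0) :
    let s := xs.foldl altStep (true, z, t, p)
    (s.2.2.1, s.2.2.2) =
      (t + sumZ (trimBack (rleAux k c xs)), p + cntZ (trimBack (rleAux k c xs))) := by
  induction xs generalizing k c t p z with
  | nil =>
    simp only [List.foldl]
    by_cases hk : k = 0 <;>
      simp [rleAux, trimBack, pyGet_neg_one_cons, hk, sumZ, cntZ]
  | cons x xs ih =>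
    simp only [List.foldl]
    by_cases hxk : x = k
    · subst hxk
      by_cases hx0 : x = 0
      · -- continue zero run
        have hz' : z = c := by rw [hz, if_pos hx0]
        have hstep : altStep (true, z, t, p) x = (true, z + 1, t, p) := by
          simp [altStep, hx0]
        rw [hstep]
        simp only [rleAux]
        exact ih x (c + 1) t p (z + 1) (by omega) (by rw [if_pos hx0]; omega)
      · have hz' : z = 0 := by rw [hz, if_neg hx0]
        have hstep : altStep (true, z, t, p) x = (true, 0, t, p) := by
          simp [altStep, hx0, hz']
        rw [hstep]
        simp only [rleAux]
        exact ih x (c + 1) t p 0 (by omega) (by rw [if_neg hx0])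
    · simp only [rleAux, if_neg hxk]
      by_cases hk0 : k = 0
      · -- current run is zeros of length c, x ≠ 0 closes it
        have hx0 : x ≠ 0 := by rw [hk0] at hxk; exact hxk
        have hz' : z = c := by rw [hz, if_pos hk0]
        have hstep : altStep (true, z, t, p) x
            = (true, 0, t + c, p + (if 2 ≤ c ∧ c ≤ 5 then 1 else 0)) := by
          subst hz'
          simp [altStep, hx0]
          intro h
          omega
        rw [hstep]
        have := ih x 1 (t + c) (p + (if 2 ≤ c ∧ c ≤ 5 then 1 else 0)) 0 (by omega) (by rw [if_neg hx0])
        rw [this]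
        rw [hk0, trimBack_cons _ _ (rleAux_ne_nil x 1 xs)]
        rw [sumZ_cons, cntZ_cons]
        simp only [Prod.mk.injEq]
        simp only [if_true, true_and]
        exact ⟨by ring, by ring⟩
      · have hz' : z = 0 := by rw [hz, if_neg hk0]
        rw [trimBack_cons _ _ (rleAux_ne_nil x 1 xs)]
        by_cases hx0 : x = 0
        · have hstep : altStep (true, z, t, p) x = (true, z + 1, t, p) := by
            simp [altStep, hx0]
          rw [hstep]
          have := ih x 1 t p (z + 1) (by omega) (by rw [if_pos hx0]; omega)
          rw [this]
          simp [sumZ, cntZ, hk0]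
        · have hstep : altStep (true, z, t, p) x = (true, 0, t, p) := by
            simp [altStep, hx0, hz']
          rw [hstep]
          have := ih x 1 t p 0 (by omega) (by rw [if_neg hx0])
          rw [this]
          simp [sumZ, cntZ, hk0]


theorem trimBack_head (r : Int × Int) (l : List (Int × Int)) :
    trimBack (r :: l) = [] ∨ ∃ l', trimBack (r :: l) = r :: l' := by
  cases l with
  | nil =>
    unfold trimBack
    rw [pyGet_neg_one_cons]
    by_cases h : r.1 = 0
    · left; simp [h]
    · right; exact ⟨[], by simp [h]⟩
  | cons b bs =>
    right
    exact ⟨trimBack (b :: bs), trimBack_cons _ _ (by simp)⟩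

theorem trimDay_zero_cons (c : Int) (l : List (Int × Int)) (hl : l ≠ []) :
    trimDay ((0, c) :: l) = trimBack l := by
  have h1 : trimDay ((0, c) :: l)
      = (if (trimBack ((0, c) :: l)).length = 0 then trimBack ((0, c) :: l)
         else match trimBack ((0, c) :: l) with
           | r :: rest => if r.1 = 0 then rest else trimBack ((0, c) :: l)
           | [] => trimBack ((0, c) :: l)) := rfl
  rw [h1, trimBack_cons _ _ hl]
  simp

theorem trimDay_nonzero_head (x c : Int) (hx : x ≠ 0) (l : List (Int × Int)) :
    trimDay ((x, c) :: l) = trimBack ((x, c) :: l) := by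
  have h1 : trimDay ((x, c) :: l)
      = (if (trimBack ((x, c) :: l)).length = 0 then trimBack ((x, c) :: l)
         else match trimBack ((x, c) :: l) with
           | r :: rest => if r.1 = 0 then rest else trimBack ((x, c) :: l)
           | [] => trimBack ((x, c) :: l)) := rfl
  rw [h1]
  have hnn : trimBack ((x, c) :: l) ≠ [] := trimBack_ne_nil_of_head_ne_zero x c hx l
  rcases trimBack_head (x, c) l with h | ⟨l', h⟩
  · exact absurd h hnn
  · rw [h]
    simp [hx]

theorem false_inv (xs : List Int) (c z t p : Int) (hc : 1 ≤ c) :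
    let s := xs.foldl altStep (false, z, t, p)
    (s.2.2.1, s.2.2.2) =
      (t + sumZ (trimDay (rleAux 0 c xs)), p + cntZ (trimDay (rleAux 0 c xs))) := by
  induction xs generalizing c z t p with
  | nil =>
    simp only [List.foldl]
    have h : trimDay (rleAux 0 c []) = [] := by
      have : trimDay [((0 : Int), c)]
          = (if (trimBack [((0 : Int), c)]).length = 0 then trimBack [((0 : Int), c)]
             else match trimBack [((0 : Int), c)] with
               | r :: rest => if r.1 = 0 then rest else trimBack [((0 : Int), c)]
               | [] => trimBack [((0 : Int), c)]) := rfl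
      simp only [rleAux, this]
      unfold trimBack
      rw [pyGet_neg_one_cons]
      simp
    rw [show rleAux 0 c [] = [((0 : Int), c)] from rfl] at h
    simp [rleAux, h, sumZ, cntZ]
  | cons x xs ih =>
    simp only [List.foldl]
    by_cases hx0 : x = 0
    · subst hx0
      have hstep : altStep (false, z, t, p) 0 = (false, z + 1, t, p) := by
        simp [altStep]
      rw [hstep]
      simp only [rleAux]
      exact ih (c + 1) (z + 1) t p (by omega)
    · have hstep : altStep (false, z, t, p) x = (true, 0, t, p) := by
        simp [altStep, hx0]
      rw [hstep]
      have hmain := main_inv xs x 1 t p 0 (by omega) (by rw [if_neg hx0])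
      simp only [] at hmain
      rw [hmain]
      simp only [rleAux, if_neg (show ¬ x = 0 from hx0)]
      rw [trimDay_zero_cons c _ (rleAux_ne_nil x 1 xs)]

theorem day_lemma (d : List Int) (z t p : Int) :
    let s := d.foldl altStep (false, z, t, p)
    (s.2.2.1, s.2.2.2) = (t + sumZ (trimDay (rleOf d)), p + cntZ (trimDay (rleOf d))) := by
  cases d with
  | nil =>
    simp only [List.foldl, rleOf]
    have h : trimDay ([] : List (Int × Int)) = [] := by
      unfold trimDay
      simp [PySem.List.pyGet?, PySem.List.pyIdx?]
    rw [h]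
    simp [sumZ, cntZ]
  | cons x xs =>
    simp only [List.foldl, rleOf]
    by_cases hx0 : x = 0
    · subst hx0
      have hstep : altStep (false, z, t, p) 0 = (false, z + 1, t, p) := by
        simp [altStep]
      rw [hstep]
      exact false_inv xs 1 (z + 1) t p (by omega)
    · have hstep : altStep (false, z, t, p) x = (true, 0, t, p) := by
        simp [altStep, hx0]
      rw [hstep]
      have hmain := main_inv xs x 1 t p 0 (by omega) (by rw [if_neg hx0])
      simp only [] at hmain
      rw [hmain]
      obtain ⟨c', rest, hhd⟩ := rleAux_head x 1 xs
      rw [hhd, trimDay_nonzero_head x c' hx0 rest]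

theorem fold_days (tt : List (List Int)) (t p : Int) :
    tt.foldl (fun (acc : Int × Int) day =>
        let s := day.foldl altStep (false, 0, acc.1, acc.2)
        (s.2.2.1, s.2.2.2)) (t, p)
    = (t + (((tt.map (fun x => rleOf x)).map trimDay).map (fun day => sumZ day)).sum,
       p + (((tt.map (fun x => rleOf x)).map trimDay).map (fun day => cntZ day)).sum) := by
  induction tt generalizing t p with
  | nil => simp
  | cons d tt ih =>
    simp only [List.foldl, List.map, List.sum_cons]
    have hd := day_lemma d 0 t p
    simp only [] at hd
    rw [hd, ih]
    simp only [Prod.mk.injEq]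
    exact ⟨by ring, by ring⟩

-- ===== VERDICT (by name: the statement is the Claim_ definition above) =====
theorem getAvgLengthBreaks_spec : Claim_equal_getAvgLengthBreaks := by
  intro timeTable _ _
  unfold Spec_getAvgLengthBreaks getAvgLengthBreaks getAvgLengthBreaks_alt
  rw [fold_days timeTable 0 0]
  simp only [zero_add]
  rfl
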